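-- pv_equiv track=rewrite | github.com/donblink/webucator | flow_control/all_and_any.py | all_true
-- ===== SOURCE A (Python) =====
-- def all_true(iterable):
--     result = False
--     for item in iterable:
--         if bool(item):
--             result = True
--             continue
--         else:
--             result = False
--             break
--     return result
-- ===== SOURCE B (Python) =====
-- def all_true(iterable):
--     # all-truthy as an aggregation: the minimum of the boolean image
--     # (min over {False < True}); default=False gives the empty case.
--     return min(map(bool, iterable), default=False)
-- ===== Notes on version B (the rewrite author's own statement) =====
-- stated objective: alternative
-- what changed: Replaces the flag-and-break short-circuit loop by a pure aggregation: the result is min(map(bool, iterable), default=False), the minimum over the boolean lattice, with no early exit and no mutable state.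
import Mathlib
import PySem

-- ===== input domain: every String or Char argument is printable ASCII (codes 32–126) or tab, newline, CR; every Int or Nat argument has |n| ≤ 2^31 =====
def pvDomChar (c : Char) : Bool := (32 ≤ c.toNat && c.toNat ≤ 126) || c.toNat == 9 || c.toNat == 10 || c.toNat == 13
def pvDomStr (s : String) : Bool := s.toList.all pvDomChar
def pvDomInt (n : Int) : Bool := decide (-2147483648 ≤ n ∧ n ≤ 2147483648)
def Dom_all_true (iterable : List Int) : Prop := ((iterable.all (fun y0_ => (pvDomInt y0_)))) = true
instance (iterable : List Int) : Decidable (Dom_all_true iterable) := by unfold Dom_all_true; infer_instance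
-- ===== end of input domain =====

-- B computes all-truthy as the minimum of the boolean image (min with default=False) instead of a flag-and-break loop.


-- ===== PORT A =====
-- the for-loop with its mutable `result`, `continue` and `break`, as structural recursion
def allTrueLoop : List Int → Bool → Bool
  | [], result => result
  | item :: rest, _ =>
      if item != 0 then allTrueLoop rest true   -- result = True; continue
      else false                                 -- result = False; break

def all_true (iterable : List Int) : Bool := allTrueLoop iterable false

-- ===== PORT B =====
-- min(map(bool, iterable), default=False): map to bools, then Python's min
-- (first element as accumulator, `if x < m then x else m`), default false on empty
def all_true_alt (iterable : List Int) : Bool :=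
  match iterable.map (fun x => x != 0) with
  | [] => false
  | b :: bs => bs.foldl (fun m x => if x < m then x else m) b

-- ===== PRECONDITION & SPEC =====
def Spec_all_true (iterable : List Int) (out : Bool) : Prop := out = all_true_alt iterable
instance (iterable : List Int) (out : Bool) : Decidable (Spec_all_true iterable out) := by unfold Spec_all_true; infer_instance

-- ===== CLAIM (what is proved, stated in full; the proofs are below) =====
def Claim_equal_all_true : Prop := ∀ (iterable : List Int), Dom_all_true iterable → Spec_all_true iterable (all_true iterable)

-- ===== LEMMAS AND PROOFS =====

theorem min_step (m x : Bool) : (if x < m then x else m) = (m && x) := by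
  cases m <;> cases x <;> decide

theorem foldl_min_bool (bs : List Bool) (b : Bool) :
    bs.foldl (fun m x => if x < m then x else m) b = (b && bs.all id) := by
  simp only [min_step]
  induction bs generalizing b with
  | nil => simp
  | cons x xs ih =>
      rw [List.foldl_cons, ih, List.all_cons]
      simp [Bool.and_assoc]

theorem allTrueLoop_true_eq_all (xs : List Int) :
    allTrueLoop xs true = xs.all (fun x => x != 0) := by
  induction xs with
  | nil => rfl
  | cons x xs ih =>
      simp only [allTrueLoop, List.all_cons]
      by_cases h : x != 0
      · simp [h, ih]
      · simp at h; simp [h]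

-- ===== VERDICT (by name: the statement is the Claim_ definition above) =====
theorem all_true_spec : Claim_equal_all_true := by
  intro iterable _
  unfold Spec_all_true all_true all_true_alt
  cases iterable with
  | nil => rfl
  | cons x xs =>
      simp only [allTrueLoop, List.map_cons, foldl_min_bool]
      by_cases h : x != 0
      · simp [h, allTrueLoop_true_eq_all, List.all_map]
      · simp at h; simp [h]
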